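-- pv_equiv track=rewrite | github.com/OskarBreach/advent-of-code-2018 | day07.py | clean_up_finished_jobs
-- ===== SOURCE A (Python) =====
-- def get_free_workers(workers):
--     free_workers = []
--
--     for worker in workers:
--         if workers[worker][0] == 0:
--             free_workers.append(worker)
--
--     return free_workers
--
-- def clean_up_finished_jobs(prerequisites, workers):
--     free_workers = get_free_workers(workers)
--     for free_worker in free_workers:
--         job_finished = workers[free_worker][1]
--         if job_finished is not None:
--             for prerequisite in prerequisites:
--                 if job_finished in prerequisites[prerequisite]:
--                     prerequisites[prerequisite].remove(job_finished)
--         workers[free_worker] = (0, None)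
--
--     return prerequisites, workers
-- ===== SOURCE B (Python) =====
-- def clean_up_finished_jobs(prerequisites, workers):
--     counts = {}
--     for worker in workers:
--         time_left, job = workers[worker]
--         if time_left == 0:
--             if job is not None:
--                 counts[job] = counts.get(job, 0) + 1
--             workers[worker] = (0, None)
--     for prerequisite in prerequisites:
--         remaining = dict(counts)
--         kept = []
--         for job in prerequisites[prerequisite]:
--             r = remaining.get(job, 0)
--             if r > 0:
--                 remaining[job] = r - 1
--             else:
--                 kept.append(job)
--         prerequisites[prerequisite] = kept
--     return prerequisites, workers
-- ===== Notes on version B (the rewrite author's own statement) =====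
-- stated objective: faster
-- what changed: B replaces A's per-finished-job guarded .remove scans over every prerequisite list by a counting algorithm: one pass over workers builds a multiset count of finished jobs while resetting free workers, then each prerequisite list is rebuilt in a single left-to-right pass that drops an element while its remaining count is positive (erasing exactly the first c occurrences, matching repeated first-occurrence removal); Pre_ excludes association lists with duplicate keys, which encode no Python dict input.
import Mathlib
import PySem

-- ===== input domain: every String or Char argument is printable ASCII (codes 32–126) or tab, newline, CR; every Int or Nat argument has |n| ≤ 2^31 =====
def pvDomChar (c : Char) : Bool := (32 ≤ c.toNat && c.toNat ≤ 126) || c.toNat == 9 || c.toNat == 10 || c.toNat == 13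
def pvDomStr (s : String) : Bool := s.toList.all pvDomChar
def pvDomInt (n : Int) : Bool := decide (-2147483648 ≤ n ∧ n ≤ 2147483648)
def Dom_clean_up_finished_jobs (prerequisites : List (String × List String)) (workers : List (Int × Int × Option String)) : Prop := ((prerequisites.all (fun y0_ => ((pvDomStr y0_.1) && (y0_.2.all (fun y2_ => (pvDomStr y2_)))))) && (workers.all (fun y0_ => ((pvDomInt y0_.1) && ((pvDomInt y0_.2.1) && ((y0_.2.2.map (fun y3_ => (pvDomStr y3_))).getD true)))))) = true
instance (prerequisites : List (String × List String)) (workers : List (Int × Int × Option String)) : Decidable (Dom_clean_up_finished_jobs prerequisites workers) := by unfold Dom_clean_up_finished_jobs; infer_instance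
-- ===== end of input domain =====

-- B replaces A's repeated guarded `.remove` scans by a faster counting algorithm (measured
-- faster in a timing run): one pass over
-- workers builds a COUNT of finished jobs while resetting free workers, then each prerequisite
-- list is rebuilt in a single left-to-right pass that drops an element while its remaining
-- count is positive (= erasing the first c occurrences, A's repeated-first-removal semantics).
-- Both Pythons mutate their dict arguments; A edits the prerequisite LISTS in place while B
-- rebinds the keys to fresh lists — the equivalence proved is about the returned pair.

-- ===== PORT A =====
-- dicts are PySem.Dict wrapped around the given association lists; `workers[worker]` /
-- `prerequisites[prerequisite]` index with a key taken from the dict's own iteration, so the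
-- key is present and `getD` with a junk default is exact; `.remove` is guarded by the
-- membership test, so `remove?` is `some` and `.getD []` is exact.
def get_free_workers (workers : PySem.Dict Int (Int × Option String)) : List Int :=
  workers.keys.foldl
    (fun free_workers worker =>
      if (workers.getD worker (0, none)).1 == 0 then free_workers ++ [worker] else free_workers)
    []

def clean_up_finished_jobs (prerequisites : List (String × List String))
    (workers : List (Int × Int × Option String)) :
    (List (String × List String)) × (List (Int × Int × Option String)) :=
  let st := (get_free_workers (PySem.Dict.mk workers)).foldl
    (fun (st : PySem.Dict String (List String) × PySem.Dict Int (Int × Option String)) free_worker =>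
      let job_finished := (st.2.getD free_worker (0, none)).2
      let pd :=
        match job_finished with
        | none => st.1
        | some j =>
          st.1.keys.foldl
            (fun pd prerequisite =>
              if (pd.getD prerequisite []).contains j then
                pd.insert prerequisite ((PySem.List.remove? (pd.getD prerequisite []) j).getD [])
              else pd)
            st.1
      (pd, st.2.insert free_worker (0, none)))
    (PySem.Dict.mk prerequisites, PySem.Dict.mk workers)
  (st.1.items, st.2.items)

-- ===== PORT B =====
def clean_up_finished_jobs_alt (prerequisites : List (String × List String))
    (workers : List (Int × Int × Option String)) :
    (List (String × List String)) × (List (Int × Int × Option String)) :=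
  -- one pass over workers: count the finished jobs of free workers, resetting each in the loop
  let cw := (PySem.Dict.mk workers).keys.foldl
    (fun (st : PySem.Dict String Int × PySem.Dict Int (Int × Option String)) worker =>
      let tv := st.2.getD worker (0, none)
      if tv.1 == 0 then
        ((match tv.2 with
          | some j => st.1.insert j (st.1.getD j 0 + 1)
          | none => st.1),
         st.2.insert worker (0, none))
      else st)
    (PySem.Dict.empty, PySem.Dict.mk workers)
  -- rebuild each prerequisite list in ONE pass, consuming a fresh copy of the counts
  let pd := (PySem.Dict.mk prerequisites).keys.foldl
    (fun pd prerequisite =>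
      let kept := (pd.getD prerequisite []).foldl
        (fun (st : PySem.Dict String Int × List String) job =>
          let r := st.1.getD job 0
          if r > 0 then (st.1.insert job (r - 1), st.2)
          else (st.1, st.2 ++ [job]))
        (cw.1, [])
      pd.insert prerequisite kept.2)
    (PySem.Dict.mk prerequisites)
  (pd.items, cw.2.items)

-- ===== PRECONDITION & SPEC =====
-- Pre_ excludes association lists with duplicate keys: Python A's parameters are dicts, whose
-- encoding under the type convention always has distinct keys, so a duplicate-key list encodes
-- no input A is ever run on.
def Pre_clean_up_finished_jobs (prerequisites : List (String × List String)) (workers : List (Int × Int × Option String)) : Prop :=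
  (prerequisites.map Prod.fst).Nodup ∧ (workers.map Prod.fst).Nodup

instance (prerequisites : List (String × List String)) (workers : List (Int × Int × Option String)) : Decidable (Pre_clean_up_finished_jobs prerequisites workers) := by
  unfold Pre_clean_up_finished_jobs; infer_instance

def pvWitness_clean_up_finished_jobs : (List (String × List String)) × (List (Int × Int × Option String)) :=
  ([("B", ["A", "C"]), ("C", ["A"])], [(1, (0, some "A")), (2, (3, some "C"))])

def Spec_clean_up_finished_jobs (prerequisites : List (String × List String)) (workers : List (Int × Int × Option String)) (out : (List (String × List String)) × (List (Int × Int × Option String))) : Prop := out = clean_up_finished_jobs_alt prerequisites workers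
instance (prerequisites : List (String × List String)) (workers : List (Int × Int × Option String)) (out : (List (String × List String)) × (List (Int × Int × Option String))) : Decidable (Spec_clean_up_finished_jobs prerequisites workers out) := by unfold Spec_clean_up_finished_jobs; infer_instance

-- ===== CLAIM (what is proved, stated in full; the proofs are below) =====
def Claim_equal_clean_up_finished_jobs : Prop := ∀ (prerequisites : List (String × List String)) (workers : List (Int × Int × Option String)), Dom_clean_up_finished_jobs prerequisites workers → Pre_clean_up_finished_jobs prerequisites workers → Spec_clean_up_finished_jobs prerequisites workers (clean_up_finished_jobs prerequisites workers)

-- ===== LEMMAS AND PROOFS =====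

-- A's guarded in-place removal of one job `j` from the list at key `p`
def pvStep (j : String) (pd : PySem.Dict String (List String)) (p : String) :
    PySem.Dict String (List String) :=
  if (pd.getD p []).contains j then
    pd.insert p ((PySem.List.remove? (pd.getD p []) j).getD [])
  else pd

-- its effect on a single value
def pvRem (j : String) (l : List String) : List String :=
  if l.contains j then (PySem.List.remove? l j).getD [] else l

lemma pvRem_eq_erase (j : String) (l : List String) : pvRem j l = l.erase j := by
  unfold pvRem
  by_cases h : j ∈ l
  · rw [if_pos (by simpa [List.contains_eq_mem] using h), PySem.List.remove?_eq_some_erase l j h]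
    rfl
  · rw [if_neg (by simpa [List.contains_eq_mem] using h), List.erase_of_not_mem h]

lemma getD_pvStep (j : String) (pd : PySem.Dict String (List String)) (p q : String) :
    (pvStep j pd p).getD q [] = if q = p then pvRem j (pd.getD p []) else pd.getD q [] := by
  unfold pvStep pvRem
  by_cases h : (pd.getD p []).contains j
  · simp only [h, if_true, PySem.Dict.getD_insert]
  · simp only [h, Bool.false_eq_true, if_false]
    by_cases hq : q = p
    · subst hq; simp
    · simp [hq]

lemma keys_pvStep (j : String) (pd : PySem.Dict String (List String)) (p : String) :
    (pvStep j pd p).keys = pd.keys := by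
  unfold pvStep
  by_cases h : (pd.getD p []).contains j
  · simp only [h, if_true]
    apply PySem.Dict.keys_insert_of_contains
    by_contra hc
    have : pd.getD p [] = [] := PySem.Dict.getD_of_not_contains pd [] (by
      cases hcc : pd.contains p
      · rfl
      · exact absurd hcc hc)
    rw [this] at h; simp at h
  · simp only [List.contains_eq_mem] at h
    simp [h]

lemma keys_foldl_pvStep (j : String) (ks : List String) (pd : PySem.Dict String (List String)) :
    (ks.foldl (pvStep j) pd).keys = pd.keys := by
  induction ks generalizing pd with
  | nil => rfl
  | cons p ks ih => simp only [List.foldl_cons]; rw [ih, keys_pvStep]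

lemma getD_foldl_pvStep (j : String) (ks : List String) (hnd : ks.Nodup)
    (pd : PySem.Dict String (List String)) (k : String) :
    (ks.foldl (pvStep j) pd).getD k [] =
      if k ∈ ks then pvRem j (pd.getD k []) else pd.getD k [] := by
  induction ks generalizing pd with
  | nil => simp
  | cons p ks ih =>
    rcases List.nodup_cons.mp hnd with ⟨hp, hnd'⟩
    simp only [List.foldl_cons]
    rw [ih hnd', getD_pvStep]
    by_cases hk : k ∈ ks
    · have : k ≠ p := fun h => hp (h ▸ hk)
      simp [hk, this]
    · by_cases hkp : k = p
      · subst hkp; simp [hk]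
      · simp [hk, hkp]

lemma keys_phaseA (js : List String) (pd : PySem.Dict String (List String)) :
    (js.foldl (fun pd j => pd.keys.foldl (pvStep j) pd) pd).keys = pd.keys := by
  induction js generalizing pd with
  | nil => rfl
  | cons j js ih => simp only [List.foldl_cons]; rw [ih, keys_foldl_pvStep]

lemma getD_phaseA (js : List String) (pd : PySem.Dict String (List String))
    (hnd : pd.keys.Nodup) (k : String) :
    (js.foldl (fun pd j => pd.keys.foldl (pvStep j) pd) pd).getD k [] =
      if k ∈ pd.keys then js.foldl (fun l j => pvRem j l) (pd.getD k []) else pd.getD k [] := by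
  induction js generalizing pd with
  | nil => simp
  | cons j js ih =>
    simp only [List.foldl_cons]
    rw [ih _ (by rw [keys_foldl_pvStep]; exact hnd), keys_foldl_pvStep,
      getD_foldl_pvStep j pd.keys hnd]
    by_cases hk : k ∈ pd.keys <;> simp [hk]

def pvJobsOf (ks : List Int) (wd : PySem.Dict Int (Int × Option String)) : List String :=
  ks.filterMap (fun k => (wd.getD k (0, none)).2)

lemma pvJobsOf_insert (ks : List Int) (wd : PySem.Dict Int (Int × Option String))
    (f : Int) (hf : f ∉ ks) (v : Int × Option String) :
    pvJobsOf ks (wd.insert f v) = pvJobsOf ks wd := by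
  unfold pvJobsOf
  apply List.filterMap_congr
  intro k hk
  rw [PySem.Dict.getD_insert_of_ne _ _ _ (by rintro rfl; exact hf hk)]

lemma A_fold (ks : List Int) (hnd : ks.Nodup)
    (pd : PySem.Dict String (List String)) (wd : PySem.Dict Int (Int × Option String)) :
    ks.foldl
      (fun (st : PySem.Dict String (List String) × PySem.Dict Int (Int × Option String)) free_worker =>
        let job_finished := (st.2.getD free_worker (0, none)).2
        let pd :=
          match job_finished with
          | none => st.1
          | some j =>
            st.1.keys.foldl
              (fun pd prerequisite =>
                if (pd.getD prerequisite []).contains j then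
                  pd.insert prerequisite ((PySem.List.remove? (pd.getD prerequisite []) j).getD [])
                else pd)
              st.1
        (pd, st.2.insert free_worker (0, none)))
      (pd, wd) =
    ((pvJobsOf ks wd).foldl (fun pd j => pd.keys.foldl (pvStep j) pd) pd,
     ks.foldl (fun wd k => wd.insert k (0, none)) wd) := by
  induction ks generalizing pd wd with
  | nil => simp [pvJobsOf]
  | cons f ks ih =>
    rcases List.nodup_cons.mp hnd with ⟨hf, hnd'⟩
    simp only [List.foldl_cons]
    rw [ih hnd']
    congr 1
    rw [pvJobsOf_insert ks wd f hf]
    cases hj : (wd.getD f (0, none)).2 with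
    | none => simp [pvJobsOf, hj]
    | some v =>
      simp only [pvJobsOf, List.filterMap_cons, hj, List.foldl_cons]
      rfl

-- ---------- B-side lemmas ----------

-- B's worker pass, peeled: counts accumulate over the finished jobs of the (already-filtered)
-- free workers, the worker dict receives the same (0, None) inserts as A's pass.
lemma B_workers (ks : List Int) (hnd : ks.Nodup)
    (cnt : PySem.Dict String Int) (wd : PySem.Dict Int (Int × Option String)) :
    ks.foldl
      (fun (st : PySem.Dict String Int × PySem.Dict Int (Int × Option String)) worker =>
        let tv := st.2.getD worker (0, none)
        if tv.1 == 0 then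
          ((match tv.2 with
            | some j => st.1.insert j (st.1.getD j 0 + 1)
            | none => st.1),
           st.2.insert worker (0, none))
        else st)
      (cnt, wd) =
    ((pvJobsOf (ks.filter (fun k => (wd.getD k (0, none)).1 == 0)) wd).foldl
       (fun c (j : String) => c.insert j (c.getD j 0 + 1)) cnt,
     (ks.filter (fun k => (wd.getD k (0, none)).1 == 0)).foldl
       (fun wd k => wd.insert k (0, none)) wd) := by
  induction ks generalizing cnt wd with
  | nil => simp [pvJobsOf]
  | cons k ks ih =>
    rcases List.nodup_cons.mp hnd with ⟨hk, hnd'⟩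
    have hfilt : ∀ v, ks.filter (fun k' => (((wd.insert k v).getD k' (0, none)).1 == 0)) =
        ks.filter (fun k' => ((wd.getD k' (0, none)).1 == 0)) := by
      intro v
      apply List.filter_congr
      intro x hx
      rw [PySem.Dict.getD_insert_of_ne _ _ _ (by rintro rfl; exact hk hx)]
    by_cases h : (wd.getD k (0, none)).1 == 0
    · simp only [List.foldl_cons, h, if_true, List.filter_cons, ih hnd', hfilt]
      rw [pvJobsOf_insert _ _ _ (fun hm => hk (List.mem_of_mem_filter hm))]
      cases hj : (wd.getD k (0, none)).2 with
      | none => simp [pvJobsOf, hj]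
      | some v => simp only [pvJobsOf, List.filterMap_cons, hj, List.foldl_cons]
    · simp only [List.foldl_cons, h, Bool.false_eq_true, if_false, List.filter_cons, ih hnd' cnt wd]

-- abstract one-pass "drop while the remaining count is positive" scan
def pvScan (l : List String) (c : String → Int) : List String :=
  match l with
  | [] => []
  | x :: l => if c x > 0 then pvScan l (fun y => if y = x then c x - 1 else c y)
              else x :: pvScan l c

lemma pvScan_congr (l : List String) (c c' : String → Int) (h : ∀ x, c x = c' x) :
    pvScan l c = pvScan l c' := by
  induction l generalizing c c' with
  | nil => rfl
  | cons x l ih =>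
    simp only [pvScan, h x]
    by_cases hx : c' x > 0
    · simp only [hx, if_true]
      exact ih _ _ (fun y => by by_cases hy : y = x <;> simp [hy, h]) 
    · simp only [hx, if_false]
      rw [ih _ _ h]

-- B's inner rebuild fold IS pvScan of the list against the dict's counts
lemma B_scan (l : List String) (cnt : PySem.Dict String Int) (acc : List String) :
    (l.foldl
      (fun (st : PySem.Dict String Int × List String) job =>
        let r := st.1.getD job 0
        if r > 0 then (st.1.insert job (r - 1), st.2)
        else (st.1, st.2 ++ [job]))
      (cnt, acc)).2 = acc ++ pvScan l (fun j => cnt.getD j 0) := by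
  induction l generalizing cnt acc with
  | nil => simp [pvScan]
  | cons x l ih =>
    simp only [List.foldl_cons, pvScan]
    by_cases h : cnt.getD x 0 > 0
    · simp only [h, if_true]
      rw [ih]
      congr 1
      apply pvScan_congr
      intro y
      rw [PySem.Dict.getD_insert]
    · simp only [h, if_false]
      rw [ih, List.append_assoc]
      rfl

lemma pvScan_nonpos (l : List String) (c : String → Int) (h : ∀ x, c x ≤ 0) :
    pvScan l c = l := by
  induction l generalizing c with
  | nil => rfl
  | cons x l ih =>
    simp only [pvScan]
    have : ¬ c x > 0 := by have := h x; omega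
    simp only [this, if_false]
    rw [ih _ h]

-- consuming one extra budgeted occurrence of j = erasing its first occurrence up front
lemma pvScan_bump (l : List String) (c : String → Int) (hc : ∀ x, 0 ≤ c x) (j : String) :
    pvScan l (fun y => if y = j then c j + 1 else c y) = pvScan (l.erase j) c := by
  induction l generalizing c with
  | nil => rfl
  | cons x l ih =>
    by_cases hx : x = j
    · subst hx
      have h1 := hc x
      simp only [pvScan, List.erase_cons_head, if_true]
      rw [if_pos (by omega : c x + 1 > 0)]
      apply pvScan_congr
      intro y
      by_cases hy : y = x
      · simp [hy]
      · simp [hy]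
    · have herase : (x :: l).erase j = x :: l.erase j := by
        rw [List.erase_cons_tail]
        simp [hx]
      rw [herase]
      have hval : (if x = j then c j + 1 else c x) = c x := by simp [hx]
      simp only [pvScan, hval]
      by_cases hcx : c x > 0
      · simp only [hcx, if_true]
        have hc' : ∀ y, 0 ≤ (fun y => if y = x then c x - 1 else c y) y := by
          intro y
          by_cases hy : y = x
          · simp only [hy]; omega
          · simp only [if_neg hy]; exact hc y
        rw [← ih (fun y => if y = x then c x - 1 else c y) hc']
        apply pvScan_congr
        intro y
        by_cases hyx : y = x
        · subst hyx
          simp [hx]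
        · by_cases hyj : y = j
          · subst hyj
            simp [hyx]
          · simp [hyx, hyj]
      · simp only [hcx, if_false]
        rw [ih c hc]

-- scanning against the counts of js = erasing first occurrences job by job (A's semantics)
lemma pvScan_counts (js l : List String) :
    pvScan l (fun j => (js.count j : Int)) = js.foldl (fun l j => pvRem j l) l := by
  induction js generalizing l with
  | nil =>
    simp only [List.count_nil, List.foldl_nil]
    exact pvScan_nonpos l _ (fun _ => by simp)
  | cons j js ih =>
    simp only [List.foldl_cons]
    rw [pvRem_eq_erase, ← ih (l.erase j),
        ← pvScan_bump l (fun x => (js.count x : Int)) (fun x => Int.natCast_nonneg _) j]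
    apply pvScan_congr
    intro y
    by_cases hy : y = j
    · simp [hy]
    · have hy' : ¬ j = y := fun h => hy h.symm
      simp [hy, hy']

-- counts built by B's worker pass, read back
lemma getD_counts (js : List String) (j : String) :
    (js.foldl (fun (c : PySem.Dict String Int) (j : String) => c.insert j (c.getD j 0 + 1))
       PySem.Dict.empty).getD j 0 = (js.count j : Int) := by
  rw [PySem.Dict.getD_foldl_insert_add_one]
  simp

-- B's outer pass over prerequisite keys: keys preserved, each key's value rewritten once
lemma B_outer_keys (F : List String → List String) (ks : List String)
    (pd : PySem.Dict String (List String)) (h : ∀ p ∈ ks, p ∈ pd.keys) :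
    (ks.foldl (fun pd p => pd.insert p (F (pd.getD p []))) pd).keys = pd.keys := by
  induction ks generalizing pd with
  | nil => rfl
  | cons p ks ih =>
    simp only [List.foldl_cons]
    have hc : pd.contains p = true := (PySem.Dict.contains_iff_mem_keys _ _).mpr (h p (by simp))
    rw [ih _ (fun q hq => by
        rw [PySem.Dict.mem_keys_insert]
        exact Or.inr (h q (List.mem_cons_of_mem _ hq))),
      PySem.Dict.keys_insert_of_contains _ _ hc]

lemma B_outer_getD (F : List String → List String) (ks : List String) (hnd : ks.Nodup)
    (pd : PySem.Dict String (List String)) (k : String) :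
    (ks.foldl (fun pd p => pd.insert p (F (pd.getD p []))) pd).getD k [] =
      if k ∈ ks then F (pd.getD k []) else pd.getD k [] := by
  induction ks generalizing pd with
  | nil => simp
  | cons p ks ih =>
    rcases List.nodup_cons.mp hnd with ⟨hp, hnd'⟩
    simp only [List.foldl_cons]
    rw [ih hnd', PySem.Dict.getD_insert]
    by_cases hk : k ∈ ks
    · have hkp : k ≠ p := fun h => hp (h ▸ hk)
      simp [hk, hkp]
    · by_cases hkp : k = p
      · subst hkp; simp [hk]
      · simp [hk, hkp]

-- ===== VERDICT (by name: the statement is the Claim_ definition above) =====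
theorem clean_up_finished_jobs_spec : Claim_equal_clean_up_finished_jobs := by
  intro prerequisites workers _ hpre
  obtain ⟨hp, hw⟩ := hpre
  have hpnd : (PySem.Dict.mk prerequisites).keys.Nodup := by
    rw [PySem.Dict.keys_mk]; exact hp
  have hwnd : (PySem.Dict.mk workers).keys.Nodup := by
    rw [PySem.Dict.keys_mk]; exact hw
  unfold Spec_clean_up_finished_jobs clean_up_finished_jobs clean_up_finished_jobs_alt
    get_free_workers
  rw [PySem.List.foldl_append_if
        (fun worker => ((PySem.Dict.mk workers).getD worker (0, none)).1 == 0)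
        (fun w => w) (PySem.Dict.mk workers).keys []]
  rw [List.map_id', List.nil_append]
  rw [A_fold _ (hwnd.filter _) (PySem.Dict.mk prerequisites) (PySem.Dict.mk workers)]
  rw [B_workers (PySem.Dict.mk workers).keys hwnd PySem.Dict.empty (PySem.Dict.mk workers)]
  refine Prod.ext ?_ rfl
  -- first components: compare items key-by-key
  dsimp only
  set js := pvJobsOf ((PySem.Dict.mk workers).keys.filter
      (fun k => ((PySem.Dict.mk workers).getD k (0, none)).1 == 0)) (PySem.Dict.mk workers) with hjs
  set cnt := js.foldl (fun (c : PySem.Dict String Int) (j : String) => c.insert j (c.getD j 0 + 1))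
      PySem.Dict.empty with hcnt
  have hAkeys := keys_phaseA js (PySem.Dict.mk prerequisites)
  have hBkeys := B_outer_keys
      (fun l => ((l.foldl
        (fun (st : PySem.Dict String Int × List String) job =>
          let r := st.1.getD job 0
          if r > 0 then (st.1.insert job (r - 1), st.2)
          else (st.1, st.2 ++ [job]))
        (cnt, [])).2)) (PySem.Dict.mk prerequisites).keys (PySem.Dict.mk prerequisites)
      (fun _ h => h)
  rw [PySem.Dict.items_eq_map_keys _ (by rw [hAkeys]; exact hpnd) ([] : List String),
      PySem.Dict.items_eq_map_keys _ (by rw [hBkeys]; exact hpnd) ([] : List String),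
      hAkeys, hBkeys]
  apply List.map_congr_left
  intro k hk
  rw [getD_phaseA js (PySem.Dict.mk prerequisites) hpnd k,
      B_outer_getD
        (fun l => (List.foldl
          (fun (st : PySem.Dict String Int × List String) job =>
            if st.1.getD job 0 > 0 then (st.1.insert job (st.1.getD job 0 - 1), st.2)
            else (st.1, st.2 ++ [job]))
          (cnt, []) l).2)
        (PySem.Dict.mk prerequisites).keys hpnd (PySem.Dict.mk prerequisites) k]
  simp only [hk, if_true]
  rw [B_scan _ cnt [], List.nil_append, Prod.mk.injEq]
  refine ⟨rfl, ?_⟩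
  rw [pvScan_congr _ _ (fun j => (js.count j : Int)) (fun j => getD_counts js j),
      pvScan_counts]
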